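-- pv_equiv track=rewrite | github.com/cafebedouin/structural_dynamics_model | python/reform_threshold_report.py | compute_reform_threshold
-- ===== SOURCE A (Python) =====
-- STANDARD_CONTEXTS = [
--     ("powerless",     "biographical",   "trapped",    "mountain"),
--     ("moderate",      "biographical",   "mobile",     "rope"),
--     ("institutional", "generational",   "arbitrage",  "rope"),
--     ("analytical",    "civilizational", "analytical",  "rope"),  # also mountain, but rope exists
-- ]
--
-- def compute_reform_threshold(from_power):
--     """Compute minimum power level where immutability transitions to rope.
--
--     Walks standard contexts in ascending power order, returns the first
--     where immutability = rope.
--     """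
--     power_order = ["powerless", "moderate", "institutional", "analytical"]
--     from_idx = power_order.index(from_power) if from_power in power_order else 0
--
--     for ctx in STANDARD_CONTEXTS:
--         power, _, _, immutability = ctx
--         ctx_idx = power_order.index(power) if power in power_order else -1
--         if ctx_idx >= from_idx and immutability == "rope":
--             return power
--
--     return None  # Genuinely immutable at all levels (shouldn't happen for snares)
-- ===== SOURCE B (Python) =====
-- STANDARD_CONTEXTS = [
--     ("powerless",     "biographical",   "trapped",    "mountain"),
--     ("moderate",      "biographical",   "mobile",     "rope"),
--     ("institutional", "generational",   "arbitrage",  "rope"),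
--     ("analytical",    "civilizational", "analytical",  "rope"),
-- ]
--
-- def compute_reform_threshold(from_power):
--     power_order = ["powerless", "moderate", "institutional", "analytical"]
--     immut = {power: immutability for (power, _, _, immutability) in STANDARD_CONTEXTS}
--     from_idx = power_order.index(from_power) if from_power in power_order else 0
--     for power in power_order[from_idx:]:
--         if immut.get(power) == "rope":
--             return power
--     return None
-- ===== Notes on version B (the rewrite author's own statement) =====
-- stated objective: simpler
-- what changed: B builds a power->immutability dict once and walks the power_order suffix from from_idx directly, instead of scanning contexts and comparing each context's recomputed index against from_idx.
import Mathlib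
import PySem

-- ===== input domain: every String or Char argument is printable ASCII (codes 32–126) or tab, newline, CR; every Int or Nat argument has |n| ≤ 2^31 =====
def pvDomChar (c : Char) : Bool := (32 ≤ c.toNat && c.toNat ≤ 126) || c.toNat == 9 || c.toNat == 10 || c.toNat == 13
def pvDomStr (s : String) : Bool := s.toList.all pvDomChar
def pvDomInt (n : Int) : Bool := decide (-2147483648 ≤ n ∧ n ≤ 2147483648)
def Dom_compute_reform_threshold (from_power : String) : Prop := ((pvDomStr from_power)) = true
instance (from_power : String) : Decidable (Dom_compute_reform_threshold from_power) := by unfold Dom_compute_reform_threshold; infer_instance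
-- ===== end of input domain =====

set_option maxRecDepth 4000


-- ===== PORT A =====
-- B replaces A's per-context index comparison by a dict lookup over the power_order suffix (simpler).
def pvPowerOrder : List String := ["powerless", "moderate", "institutional", "analytical"]

def pvContexts : List (String × String × String × String) :=
  [("powerless",     "biographical",   "trapped",    "mountain"),
   ("moderate",      "biographical",   "mobile",     "rope"),
   ("institutional", "generational",   "arbitrage",  "rope"),
   ("analytical",    "civilizational", "analytical", "rope")]

def pvLoopA (from_idx : Int) : List (String × String × String × String) → Option String
  | [] => none
  | (power, _, _, immutability) :: rest =>
    let ctx_idx : Int :=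
      if pvPowerOrder.contains power then (((PySem.List.index? pvPowerOrder power).getD 0 : Nat) : Int) else -1
    if ctx_idx ≥ from_idx ∧ immutability = "rope" then some power else pvLoopA from_idx rest

def compute_reform_threshold (from_power : String) : Option String :=
  let from_idx : Int :=
    if pvPowerOrder.contains from_power then (((PySem.List.index? pvPowerOrder from_power).getD 0 : Nat) : Int) else 0
  pvLoopA from_idx pvContexts

-- ===== PORT B =====
def pvImmut : PySem.Dict String String :=
  PySem.Dict.ofList (pvContexts.map (fun c => (c.1, c.2.2.2)))

def pvLoopB : List String → Option String
  | [] => none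
  | power :: rest => if pvImmut.get? power = some "rope" then some power else pvLoopB rest

def compute_reform_threshold_alt (from_power : String) : Option String :=
  let from_idx : Int :=
    if pvPowerOrder.contains from_power then (((PySem.List.index? pvPowerOrder from_power).getD 0 : Nat) : Int) else 0
  pvLoopB (PySem.List.slice pvPowerOrder (some from_idx) none)

-- ===== PRECONDITION & SPEC =====
def Spec_compute_reform_threshold (from_power : String) (out : Option String) : Prop := out = compute_reform_threshold_alt from_power
instance (from_power : String) (out : Option String) : Decidable (Spec_compute_reform_threshold from_power out) := by unfold Spec_compute_reform_threshold; infer_instance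

-- ===== CLAIM (what is proved, stated in full; the proofs are below) =====
def Claim_equal_compute_reform_threshold : Prop := ∀ (from_power : String), Dom_compute_reform_threshold from_power → Spec_compute_reform_threshold from_power (compute_reform_threshold from_power)

-- ===== LEMMAS AND PROOFS =====

-- ===== VERDICT (by name: the statement is the Claim_ definition above) =====
theorem compute_reform_threshold_spec : Claim_equal_compute_reform_threshold := by
  intro s _
  unfold Spec_compute_reform_threshold
  by_cases h1 : s = "powerless"; · subst h1; decide
  by_cases h2 : s = "moderate"; · subst h2; decide
  by_cases h3 : s = "institutional"; · subst h3; decide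
  by_cases h4 : s = "analytical"; · subst h4; decide
  have hm : s ∉ pvPowerOrder := by
    simp [pvPowerOrder, h1, h2, h3, h4]
  simp only [compute_reform_threshold, compute_reform_threshold_alt,
    List.contains_eq_mem, decide_eq_true_eq, if_neg hm]
  decide
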